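-- pv_equiv track=rewrite | github.com/Milamoo12340/RobloxHubX | hyperium_level_scanner.py | _is_likely_asset
-- ===== SOURCE A (Python) =====
-- def _is_likely_asset(item):
--     """Determine if an item is likely to be an asset based on its fields"""
--     if not isinstance(item, dict):
--         return False
--
--     # Check for common asset ID fields
--     id_keys = ['id', 'assetId', 'Id', 'asset_id', 'AssetId', 'ID']
--     has_id = any(key in item for key in id_keys)
--
--     if not has_id:
--         return False
--
--     # Look for other asset-related fields
--     asset_related_keys = [
--         'name', 'Name', 'title', 'Title', 'description', 'Description',
--         'type', 'Type', 'assetType', 'AssetType', 'asset_type',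
--         'created', 'Created', 'updated', 'Updated',
--         'creator', 'Creator', 'creatorId', 'CreatorId',
--         'price', 'Price', 'sales', 'Sales',
--         'thumbnail', 'Thumbnail', 'image', 'Image',
--         'model', 'Model', 'mesh', 'Mesh',
--         'rarity', 'Rarity'
--     ]
--
--     # Count how many asset-related keys are present
--     asset_key_count = sum(1 for key in asset_related_keys if key in item)
--
--     # It's likely an asset if it has an ID and several asset-related fields
--     return has_id and asset_key_count >= 2
-- ===== SOURCE B (Python) =====
-- def _is_likely_asset(item):
--     """Determine if an item is likely to be an asset based on its fields"""
--     if not isinstance(item, dict):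
--         return False
--
--     id_set = {'id', 'assetId', 'Id', 'asset_id', 'AssetId', 'ID'}
--     asset_set = {
--         'name', 'Name', 'title', 'Title', 'description', 'Description',
--         'type', 'Type', 'assetType', 'AssetType', 'asset_type',
--         'created', 'Created', 'updated', 'Updated',
--         'creator', 'Creator', 'creatorId', 'CreatorId',
--         'price', 'Price', 'sales', 'Sales',
--         'thumbnail', 'Thumbnail', 'image', 'Image',
--         'model', 'Model', 'mesh', 'Mesh',
--         'rarity', 'Rarity'
--     }
--
--     has_id = False
--     asset_count = 0
--     for key in item:
--         if key in id_set:
--             has_id = True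
--         if key in asset_set:
--             asset_count += 1
--     return has_id and asset_count >= 2
-- ===== Notes on version B (the rewrite author's own statement) =====
-- stated objective: alternative
-- what changed: Instead of scanning the two constant key lists and testing each against the dict, B makes one pass over the dict's own keys with two constant hash sets, maintaining has_id and asset_count in a single loop.
import Mathlib
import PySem

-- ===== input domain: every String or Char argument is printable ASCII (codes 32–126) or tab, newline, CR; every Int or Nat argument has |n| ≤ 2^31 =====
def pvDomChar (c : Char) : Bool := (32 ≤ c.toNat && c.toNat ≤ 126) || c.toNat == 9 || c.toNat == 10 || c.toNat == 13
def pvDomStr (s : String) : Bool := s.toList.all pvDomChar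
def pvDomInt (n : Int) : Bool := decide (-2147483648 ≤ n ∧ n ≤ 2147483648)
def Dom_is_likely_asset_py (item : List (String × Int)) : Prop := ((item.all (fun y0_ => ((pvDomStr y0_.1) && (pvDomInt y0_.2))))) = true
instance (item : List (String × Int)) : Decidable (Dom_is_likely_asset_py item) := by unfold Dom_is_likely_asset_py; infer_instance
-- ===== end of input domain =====

-- B replaces A's two scans of constant key lists by one pass over the dict's own keys
-- with two constant sets (same cost in practice: 'alternative', not 'faster').

-- ===== PORT A =====
def pvIdKeys : List String := ["id", "assetId", "Id", "asset_id", "AssetId", "ID"]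

def pvAssetKeys : List String :=
  ["name", "Name", "title", "Title", "description", "Description",
   "type", "Type", "assetType", "AssetType", "asset_type",
   "created", "Created", "updated", "Updated",
   "creator", "Creator", "creatorId", "CreatorId",
   "price", "Price", "sales", "Sales",
   "thumbnail", "Thumbnail", "image", "Image",
   "model", "Model", "mesh", "Mesh",
   "rarity", "Rarity"]

-- 'key in item' on a Python dict = membership among the keys
def is_likely_asset_py (item : List (String × Int)) : Bool :=
  let keys := item.map Prod.fst
  -- has_id = any(key in item for key in id_keys)
  let hasId := pvIdKeys.any (fun k => keys.contains k)
  if !hasId then false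
  else
    -- asset_key_count = sum(1 for key in asset_related_keys if key in item)
    let cnt : Int := (pvAssetKeys.countP (fun k => keys.contains k) : Int)
    hasId && decide (2 ≤ cnt)

-- ===== PORT B =====
def pvIdSet : PySem.Set String := PySem.Set.ofList pvIdKeys
def pvAssetSet : PySem.Set String := PySem.Set.ofList pvAssetKeys

-- single loop 'for key in item' maintaining (has_id, asset_count)
def is_likely_asset_py_alt (item : List (String × Int)) : Bool :=
  let st := item.foldl
    (fun (st : Bool × Int) kv =>
      (st.1 || PySem.Set.contains pvIdSet kv.1,
       if PySem.Set.contains pvAssetSet kv.1 then st.2 + 1 else st.2))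
    (false, 0)
  st.1 && decide (2 ≤ st.2)

-- ===== PRECONDITION & SPEC =====
-- A Python dict has pairwise-distinct keys; Pre_ restricts the association list to
-- exactly those lists that represent a dict (every Python input satisfies it).
def Pre_is_likely_asset_py (item : List (String × Int)) : Prop :=
  (item.map Prod.fst).Nodup
instance (item : List (String × Int)) : Decidable (Pre_is_likely_asset_py item) := by
  unfold Pre_is_likely_asset_py; infer_instance

def pvWitness_is_likely_asset_py : (List (String × Int)) :=
  [("id", 1), ("name", 2), ("type", 3)]

def Spec_is_likely_asset_py (item : List (String × Int)) (out : Bool) : Prop := out = is_likely_asset_py_alt item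
instance (item : List (String × Int)) (out : Bool) : Decidable (Spec_is_likely_asset_py item out) := by unfold Spec_is_likely_asset_py; infer_instance

-- ===== CLAIM (what is proved, stated in full; the proofs are below) =====
def Claim_equal_is_likely_asset_py : Prop := ∀ (item : List (String × Int)), Dom_is_likely_asset_py item → Pre_is_likely_asset_py item → Spec_is_likely_asset_py item (is_likely_asset_py item)

-- ===== LEMMAS AND PROOFS =====

-- the fold of B computed in closed form
theorem alt_fold_char (item : List (String × Int)) (b : Bool) (n : Int) :
    item.foldl
      (fun (st : Bool × Int) kv =>
        (st.1 || PySem.Set.contains pvIdSet kv.1,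
         if PySem.Set.contains pvAssetSet kv.1 then st.2 + 1 else st.2))
      (b, n)
    = (b || (item.map Prod.fst).any (fun k => PySem.Set.contains pvIdSet k),
       n + ((item.map Prod.fst).countP (fun k => PySem.Set.contains pvAssetSet k) : Int)) := by
  induction item generalizing b n with
  | nil => simp
  | cons hd tl ih =>
    simp only [List.foldl_cons, ih, List.map_cons, List.any_cons, List.countP_cons,
      Prod.mk.injEq]
    refine ⟨by simp [Bool.or_assoc], ?_⟩
    split_ifs with h
    · push_cast; ring
    · simp

-- 'any common element' is symmetric
theorem any_contains_comm (l1 l2 : List String) :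
    l1.any (fun k => l2.contains k) = l2.any (fun k => l1.contains k) := by
  rw [Bool.eq_iff_iff]
  simp only [List.any_eq_true, List.contains_iff_mem]
  exact ⟨fun ⟨a, h1, h2⟩ => ⟨a, h2, h1⟩, fun ⟨a, h1, h2⟩ => ⟨a, h2, h1⟩⟩

-- counting common elements is symmetric for duplicate-free lists
theorem countP_contains_comm (l1 l2 : List String) (h1 : l1.Nodup) (h2 : l2.Nodup) :
    l1.countP (fun k => l2.contains k) = l2.countP (fun k => l1.contains k) := by
  have key : ∀ (a b : List String), a.Nodup → b.Nodup →
      a.countP (fun k => b.contains k) = (a.toFinset ∩ b.toFinset).card := by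
    intro a b ha hb
    rw [List.countP_eq_length_filter]
    have hnd : (a.filter (fun k => b.contains k)).Nodup := ha.filter _
    rw [← List.toFinset_card_of_nodup hnd, List.toFinset_filter]
    congr 1
    ext x
    simp [Finset.mem_filter, Finset.mem_inter]
  rw [key l1 l2 h1 h2, key l2 l1 h2 h1, Finset.inter_comm]

theorem pvAssetKeys_nodup : pvAssetKeys.Nodup := by decide

theorem set_contains_id (k : String) :
    PySem.Set.contains pvIdSet k = pvIdKeys.contains k := by
  rw [Bool.eq_iff_iff]
  simp [pvIdSet, PySem.Set.mem_ofList]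

theorem set_contains_asset (k : String) :
    PySem.Set.contains pvAssetSet k = pvAssetKeys.contains k := by
  rw [Bool.eq_iff_iff]
  simp [pvAssetSet, PySem.Set.mem_ofList]

-- ===== VERDICT (by name: the statement is the Claim_ definition above) =====
theorem is_likely_asset_py_spec : Claim_equal_is_likely_asset_py := by
  intro item _ hpre
  unfold Spec_is_likely_asset_py is_likely_asset_py is_likely_asset_py_alt
  rw [alt_fold_char]
  simp only [set_contains_id, set_contains_asset, Bool.false_or, zero_add]
  rw [countP_contains_comm _ pvAssetKeys hpre pvAssetKeys_nodup]
  rw [any_contains_comm pvIdKeys]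
  cases h : (item.map Prod.fst).any (fun k => pvIdKeys.contains k) <;> simp [h]
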